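-- pv_equiv track=rewrite | github.com/aghie/parsing-as-pretraining | tree2labels/encoding2multitask.py | to_chunks
-- ===== SOURCE A (Python) =====
-- def is_beginning_of_chunk(c,c_before):
--     return c != c_before and c in ["NP","VP", "PP"]
--
-- def is_chunkeable(c):
--     return c in ["NP","VP","PP"]
--
-- def to_chunks(constituents):
--
--
--     chunk_sequence = []
--     c_before = None
--     for idc,c in enumerate(constituents):
--
--         if is_beginning_of_chunk(c, c_before):
--             chunk_sequence.append("B-"+c)
--         elif is_chunkeable(c):
--             chunk_sequence.append("I-"+c)
--         else:
--             chunk_sequence.append("O")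
--
--         c_before = c
--     return chunk_sequence
-- ===== SOURCE B (Python) =====
-- def to_chunks(constituents):
--     chunkeable = {"NP", "VP", "PP"}
--     out = []
--     i = 0
--     n = len(constituents)
--     while i < n:
--         tag = constituents[i]
--         j = i + 1
--         while j < n and constituents[j] == tag:
--             j += 1
--         if tag in chunkeable:
--             out.append("B-" + tag)
--             out.extend(["I-" + tag] * (j - i - 1))
--         else:
--             out.extend(["O"] * (j - i))
--         i = j
--     return out
-- ===== Notes on version B (the rewrite author's own statement) =====
-- stated objective: alternative
-- what changed: Replaces the per-element compare-to-previous scan with a run-segmentation pass: the input is split into maximal runs of equal consecutive tags, and each run is labelled at once (B- head plus I- tail for chunkeable tags, all O otherwise).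
import Mathlib
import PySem

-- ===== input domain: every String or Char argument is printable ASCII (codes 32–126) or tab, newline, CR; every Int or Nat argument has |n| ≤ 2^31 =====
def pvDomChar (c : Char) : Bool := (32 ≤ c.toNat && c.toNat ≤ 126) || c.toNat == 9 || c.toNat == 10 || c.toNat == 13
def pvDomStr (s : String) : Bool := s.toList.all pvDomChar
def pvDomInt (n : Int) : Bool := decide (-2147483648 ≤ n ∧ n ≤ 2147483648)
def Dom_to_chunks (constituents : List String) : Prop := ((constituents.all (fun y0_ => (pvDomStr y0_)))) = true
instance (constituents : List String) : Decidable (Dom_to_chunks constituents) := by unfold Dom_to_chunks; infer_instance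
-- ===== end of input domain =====

-- B replaces A's compare-to-previous scan with run segmentation: maximal runs of equal
-- consecutive tags are labelled as a block (objective: alternative decomposition, same cost).


-- ===== PORT A =====
def is_beginning_of_chunk (c : String) (c_before : Option String) : Bool :=
  decide (some c ≠ c_before) && (["NP", "VP", "PP"] : List String).contains c

def is_chunkeable (c : String) : Bool :=
  (["NP", "VP", "PP"] : List String).contains c

def to_chunks (constituents : List String) : List String :=
  (constituents.foldl
    (fun (st : List String × Option String) c =>
      ((if is_beginning_of_chunk c st.2 then st.1 ++ ["B-" ++ c]
        else if is_chunkeable c then st.1 ++ ["I-" ++ c]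
        else st.1 ++ ["O"]), some c))
    (([] : List String), (none : Option String))).1

-- ===== PORT B =====
def to_chunks_alt (constituents : List String) : List String :=
  match constituents with
  | [] => []
  | c :: rest =>
    let run := rest.takeWhile (· == c)
    let rest' := rest.dropWhile (· == c)
    (if is_chunkeable c then ("B-" ++ c) :: run.map (fun _ => "I-" ++ c)
     else "O" :: run.map (fun _ => "O")) ++ to_chunks_alt rest'
  termination_by constituents.length
  decreasing_by
    simp only [List.length_cons]
    exact Nat.lt_succ_of_le (List.length_dropWhile_le _ _)

-- ===== PRECONDITION & SPEC =====
def Spec_to_chunks (constituents : List String) (out : List String) : Prop := out = to_chunks_alt constituents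
instance (constituents : List String) (out : List String) : Decidable (Spec_to_chunks constituents out) := by unfold Spec_to_chunks; infer_instance

-- ===== CLAIM (what is proved, stated in full; the proofs are below) =====
def Claim_equal_to_chunks : Prop := ∀ (constituents : List String), Dom_to_chunks constituents → Spec_to_chunks constituents (to_chunks constituents)

-- ===== LEMMAS AND PROOFS =====

-- A's loop, recast as structural recursion carrying the previous tag.
def aRec (prev : Option String) : List String → List String
  | [] => []
  | c :: t =>
    (if is_beginning_of_chunk c prev then "B-" ++ c
     else if is_chunkeable c then "I-" ++ c
     else "O") :: aRec (some c) t

lemma to_chunks_foldl (l : List String) :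
    ∀ (acc : List String) (prev : Option String),
      (l.foldl
        (fun (st : List String × Option String) c =>
          ((if is_beginning_of_chunk c st.2 then st.1 ++ ["B-" ++ c]
            else if is_chunkeable c then st.1 ++ ["I-" ++ c]
            else st.1 ++ ["O"]), some c)) (acc, prev)).1 = acc ++ aRec prev l := by
  induction l with
  | nil => intro acc prev; simp [aRec]
  | cons c t ih =>
    intro acc prev
    simp only [List.foldl_cons, aRec]
    split_ifs <;> simp [ih]

lemma to_chunks_eq_aRec (l : List String) : to_chunks l = aRec none l := by
  simpa using to_chunks_foldl l [] none

lemma aRec_run (c : String) (rest : List String) :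
    ∀ (run : List String), (∀ x ∈ run, x = c) →
      aRec (some c) (run ++ rest)
        = run.map (fun _ => if is_chunkeable c then "I-" ++ c else "O") ++ aRec (some c) rest := by
  intro run
  induction run with
  | nil => intro _; simp
  | cons x t ih =>
    intro h
    have hx : x = c := h x (by simp)
    subst hx
    have : is_beginning_of_chunk x (some x) = false := by
      simp [is_beginning_of_chunk]
    simp only [List.cons_append, aRec, this, Bool.false_eq_true, if_false, List.map_cons]
    rw [ih (fun y hy => h y (by simp [hy]))]

lemma aRec_head_indep (p q : Option String) (d : String) (t : List String)
    (hp : p ≠ some d) (hq : q ≠ some d) :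
    aRec p (d :: t) = aRec q (d :: t) := by
  have h1 : is_beginning_of_chunk d p = is_beginning_of_chunk d q := by
    simp [is_beginning_of_chunk, Ne.symm hp, Ne.symm hq]
  simp [aRec, h1]

lemma alt_eq_aRec : ∀ (n : ℕ) (l : List String), l.length ≤ n → to_chunks_alt l = aRec none l := by
  intro n
  induction n with
  | zero =>
    intro l hl
    have : l = [] := List.eq_nil_of_length_eq_zero (Nat.le_zero.mp hl)
    subst this; simp [to_chunks_alt, aRec]
  | succ n ih =>
    intro l hl
    match l with
    | [] => simp [to_chunks_alt, aRec]
    | c :: rest =>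
      have hsplit : rest = rest.takeWhile (· == c) ++ rest.dropWhile (· == c) :=
        (List.takeWhile_append_dropWhile).symm
      have hrun : ∀ x ∈ rest.takeWhile (· == c), x = c := by
        intro x hx
        have := List.mem_takeWhile_imp hx
        simpa using this
      have hlen : (rest.dropWhile (· == c)).length ≤ n := by
        have := List.length_dropWhile_le (· == c) rest
        have hl' : rest.length ≤ n := by simpa using Nat.lt_succ_iff.mp (Nat.lt_of_lt_of_le (Nat.lt_succ_of_le (Nat.le_refl _)) hl)
        omega
      have htail : aRec (some c) (rest.dropWhile (· == c)) = aRec none (rest.dropWhile (· == c)) := by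
        match hrest : rest.dropWhile (· == c) with
        | [] => rfl
        | d :: t =>
          have hd : ¬ (d == c) = true := by
            have := List.head?_dropWhile_not (· == c) rest
            rw [hrest] at this
            simpa using this
          have hd' : d ≠ c := by simpa using hd
          exact aRec_head_indep (some c) none d t (by simpa using (Ne.symm hd')) (by simp)
      have hstep : aRec none (c :: rest)
          = (if is_chunkeable c then "B-" ++ c else "O")
            :: ((rest.takeWhile (· == c)).map (fun _ => if is_chunkeable c then "I-" ++ c else "O")
                ++ aRec (some c) (rest.dropWhile (· == c))) := by
        conv_lhs => rw [show (c :: rest) = c :: (rest.takeWhile (· == c) ++ rest.dropWhile (· == c)) from by rw [← hsplit]]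
        simp only [aRec]
        rw [aRec_run c _ _ hrun]
        congr 1
        by_cases h : is_chunkeable c <;>
          simp [is_beginning_of_chunk, is_chunkeable] at h ⊢ <;> simp [h]
      rw [hstep, htail]
      rw [to_chunks_alt]
      rw [← ih _ hlen]
      split_ifs with h <;> simp

-- ===== VERDICT (by name: the statement is the Claim_ definition above) =====
theorem to_chunks_spec : Claim_equal_to_chunks := by
  intro l _
  unfold Spec_to_chunks
  rw [to_chunks_eq_aRec, alt_eq_aRec l.length l (Nat.le_refl _)]
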